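-- pv_equiv track=rewrite | github.com/e-erdolu/Tracing_Interdisciplinary_Design_Conversations | text_processing/conversation_TextProcessing_V3.py | makeStopWordListsByActor
-- ===== SOURCE A (Python) =====
-- actor1 = "Paul_Goldberger"
--
-- actor2 = "Tony_Fadell"
--
-- actor3 = "Rem_Koolhaas"
--
-- stopWords = {'been', 'some', 'above', "shan't", 'up', 'whom', 'o',\
--              'why', 'under', 'if', 'isn', 'on', 'after', 'will', \
--              'during', 'before', 'myself', 'had', 'an', 'nor', \
--              'from', 'weren', 'yourselves', 'can', "you'd", 'what', \
--              'didn', 'there', "doesn't", 'more', "that'll", 'don', \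
--              'down', 'all', 'once', "wasn't", 'it', 'him', 'did', \
--              'yourself', 'does', 'she', "don't", "aren't", "hasn't", \
--              'now', 'doing', 'about', 'no', "you've", 'any', 'we', \
--              'until', 're', 'have', 'very', 'was', 'm', 'am', 'when', \
--              'again', 't', 'ours', "weren't", 'hasn', 'out', 'here', \
--              "should've", 'their', "she's", 'not', "won't", 'who', \
--              'won', 'yours', 'be', 'at', 'few', 'are', 's', 've', \
--              'to', 'couldn', "hadn't", 'shan', 'wasn', 'how', 'than', \
--              "needn't", 'doesn', 'these', 'other', 'hers', 'further', \
--              'mustn', 'and', 'has', 'itself', 'themselves', "wouldn't", \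
--              'aren', "shouldn't", 'where', 'should', "isn't", 'most', \
--              'same', "haven't", 'her', 'just', 'do', "couldn't", "mustn't", \
--              'theirs', 'they', 'such', 'haven', 'having', 'you', 'mightn', \
--              'but', 'were', 'against', "mightn't", 'himself', 'hadn', 'a', \
--              'below', 'shouldn', 'those', 'herself', 'too', 'this', 'that', \
--              'our', 'the', 'with', 'then', 'is', 'in', 'each', 'as', 'by', \
--              'he', 'ourselves', 'wouldn', 'both', 'ain', 'only', 'so', 'into', \
--              "you'll", 'while', 'd', 'i', 'needn', 'which', 'them', 'over', \
--              "didn't", 'own', 'll', 'y', "you're", 'being', 'your', 'its', \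
--              'or', 'because', 'off', 'between', 'his', 'me', 'through', \
--              "it's", 'for', 'ma', 'of', 'my', 'I', 'could', 'also', 'like',\
--              'among', 'since', 'maybe', 'may', 'might', 'mightn', "mightn't", \
--              'yeah', 'yes', 'wow', 'cuz', 'ok', 'sure', 'well', 'kind', 'would'}
--
-- def makeStopWordListsByActor(words):
--     wordList1 = []
--     wordList2 = []
--     wordList3 = []
--     actor1_On = False
--     actor2_On = False
--     actor3_On = False
--
--     for word in words:
--         ## Capturing actors' name in the corpus
--         if word == actor1:
--             actor1_On = True
--             actor2_On = False
--             actor3_On = False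
--         elif word == actor2:
--             actor1_On = False
--             actor2_On = True
--             actor3_On = False
--         elif word == actor3:
--             actor1_On = False
--             actor2_On = False
--             actor3_On = True
--
--         ## Words in actors' phrases
--         if actor1_On == True and word != actor1 and word in stopWords:
--             wordList1.append(word)
--         elif actor2_On == True and word != actor2 and word in stopWords:
--             wordList2.append(word)
--         elif actor3_On == True and word != actor3 and word in stopWords:
--             wordList3.append(word)
--
--     return wordList1, wordList2, wordList3
-- ===== SOURCE B (Python) =====
-- actor1 = "Paul_Goldberger"
-- actor2 = "Tony_Fadell"
-- actor3 = "Rem_Koolhaas"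
--
-- stopWords = {'been', 'some', 'above', "shan't", 'up', 'whom', 'o',
--              'why', 'under', 'if', 'isn', 'on', 'after', 'will',
--              'during', 'before', 'myself', 'had', 'an', 'nor',
--              'from', 'weren', 'yourselves', 'can', "you'd", 'what',
--              'didn', 'there', "doesn't", 'more', "that'll", 'don',
--              'down', 'all', 'once', "wasn't", 'it', 'him', 'did',
--              'yourself', 'does', 'she', "don't", "aren't", "hasn't",
--              'now', 'doing', 'about', 'no', "you've", 'any', 'we',
--              'until', 're', 'have', 'very', 'was', 'm', 'am', 'when',
--              'again', 't', 'ours', "weren't", 'hasn', 'out', 'here',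
--              "should've", 'their', "she's", 'not', "won't", 'who',
--              'won', 'yours', 'be', 'at', 'few', 'are', 's', 've',
--              'to', 'couldn', "hadn't", 'shan', 'wasn', 'how', 'than',
--              "needn't", 'doesn', 'these', 'other', 'hers', 'further',
--              'mustn', 'and', 'has', 'itself', 'themselves', "wouldn't",
--              'aren', "shouldn't", 'where', 'should', "isn't", 'most',
--              'same', "haven't", 'her', 'just', 'do', "couldn't", "mustn't",
--              'theirs', 'they', 'such', 'haven', 'having', 'you', 'mightn',
--              'but', 'were', 'against', "mightn't", 'himself', 'hadn', 'a',
--              'below', 'shouldn', 'those', 'herself', 'too', 'this', 'that',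
--              'our', 'the', 'with', 'then', 'is', 'in', 'each', 'as', 'by',
--              'he', 'ourselves', 'wouldn', 'both', 'ain', 'only', 'so', 'into',
--              "you'll", 'while', 'd', 'i', 'needn', 'which', 'them', 'over',
--              "didn't", 'own', 'll', 'y', "you're", 'being', 'your', 'its',
--              'or', 'because', 'off', 'between', 'his', 'me', 'through',
--              "it's", 'for', 'ma', 'of', 'my', 'I', 'could', 'also', 'like',
--              'among', 'since', 'maybe', 'may', 'might', 'mightn', "mightn't",
--              'yeah', 'yes', 'wow', 'cuz', 'ok', 'sure', 'well', 'kind', 'would'}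
--
--
-- def makeStopWordListsByActor(words):
--     # Two staged passes instead of one flag-tracking pass.
--     # Stage 1: split the word stream at actor-name markers into labelled
--     # (speaker, chunk) segments; words before the first marker belong to no one.
--     actors = (actor1, actor2, actor3)
--     segments = []
--     speaker = None
--     chunk = []
--     for w in words:
--         if w in actors:
--             if speaker is not None:
--                 segments.append((speaker, chunk))
--             speaker, chunk = w, []
--         else:
--             chunk.append(w)
--     if speaker is not None:
--         segments.append((speaker, chunk))
--     # Stage 2: for each actor, concatenate the stopwords of their segments.
--     return tuple(
--         [w for a, c in segments if a == actor for w in c if w in stopWords]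
--         for actor in actors
--     )
-- ===== Notes on version B (the rewrite author's own statement) =====
-- stated objective: alternative
-- what changed: Replaced A's single flag-tracking pass by two staged passes: first split the stream at actor-name markers into labelled (speaker, chunk) segments, then build each actor's list by filtering and concatenating that actor's segments.
import Mathlib
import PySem

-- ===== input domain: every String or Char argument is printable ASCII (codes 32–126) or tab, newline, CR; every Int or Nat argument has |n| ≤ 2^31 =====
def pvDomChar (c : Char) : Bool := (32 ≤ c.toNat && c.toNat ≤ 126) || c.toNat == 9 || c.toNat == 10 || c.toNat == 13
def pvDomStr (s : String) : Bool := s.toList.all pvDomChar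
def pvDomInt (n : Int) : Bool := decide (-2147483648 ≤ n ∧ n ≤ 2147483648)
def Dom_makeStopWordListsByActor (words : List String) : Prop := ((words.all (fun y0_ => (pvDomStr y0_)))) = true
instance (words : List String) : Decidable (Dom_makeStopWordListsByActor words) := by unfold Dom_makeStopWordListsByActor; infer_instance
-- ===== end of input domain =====

-- B replaces A's single flag-tracking pass by two staged passes: split the stream at
-- actor-name markers into labelled segments, then filter-and-concatenate per actor
-- (objective: alternative).

-- the module-level stopWords set (a Python set of distinct strings)
def pvStopWords : List String := ["I", "a", "about", "above", "after", "again", "against", "ain", "all", "also", "am", "among", "an", "and", "any", "are", "aren", "aren't", "as", "at", "be", "because", "been", "before", "being", "below", "between", "both", "but", "by", "can", "could", "couldn", "couldn't", "cuz", "d", "did", "didn", "didn't", "do", "does", "doesn", "doesn't", "doing", "don", "don't", "down", "during", "each", "few", "for", "from", "further", "had", "hadn", "hadn't", "has", "hasn", "hasn't", "have", "haven", "haven't", "having", "he", "her", "here", "hers", "herself", "him", "himself", "his", "how", "i", "if", "in", "into", "is", "isn", "isn't", "it", "it's", "its", "itself", "just", "kind", "like", "ll", "m", "ma", "may", "maybe",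 "me", "might", "mightn", "mightn't", "more", "most", "mustn", "mustn't", "my", "myself", "needn", "needn't", "no", "nor", "not", "now", "o", "of", "off", "ok", "on", "once", "only", "or", "other", "our", "ours", "ourselves", "out", "over", "own", "re", "s", "same", "shan", "shan't", "she", "she's", "should", "should've", "shouldn", "shouldn't", "since", "so", "some", "such", "sure", "t", "than", "that", "that'll", "the", "their", "theirs", "them", "themselves", "then", "there", "these", "they", "this", "those", "through", "to", "too", "under", "until", "up", "ve", "very", "was", "wasn", "wasn't", "we", "well", "were", "weren", "weren't", "what", "when", "where", "which", "while", "who", "whom", "why", "will", "with", "won", "won't", "would", "wouldn", "wouldn't", "wow", "y", "yeah", "yes", "you", "you'd", "you'll", "you're", "you've", "your", "yours", "yourself", "yourselves"]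

-- ===== PORT A =====
-- A's loop state: the three word lists and the three boolean flags.
def pvStepA (st : (List String × List String × List String) × (Bool × Bool × Bool))
    (word : String) : (List String × List String × List String) × (Bool × Bool × Bool) :=
  let l1 := st.1.1; let l2 := st.1.2.1; let l3 := st.1.2.2
  let fl :=
    if word == "Paul_Goldberger" then (true, false, false)
    else if word == "Tony_Fadell" then (false, true, false)
    else if word == "Rem_Koolhaas" then (false, false, true)
    else st.2
  if fl.1 && !(word == "Paul_Goldberger") && pvStopWords.contains word then
    ((l1 ++ [word], l2, l3), fl)
  else if fl.2.1 && !(word == "Tony_Fadell") && pvStopWords.contains word then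
    ((l1, l2 ++ [word], l3), fl)
  else if fl.2.2 && !(word == "Rem_Koolhaas") && pvStopWords.contains word then
    ((l1, l2, l3 ++ [word]), fl)
  else ((l1, l2, l3), fl)

def makeStopWordListsByActor (words : List String) : List String × List String × List String :=
  (words.foldl pvStepA (([], [], []), (false, false, false))).1

-- ===== PORT B =====
-- the tuple 'actors' of Source B
def pvActors : List String := ["Paul_Goldberger", "Tony_Fadell", "Rem_Koolhaas"]

-- Stage-1 loop state: (segments, speaker, chunk); speaker = none is Python's None
def pvSegStep (st : List (String × List String) × Option String × List String)
    (w : String) : List (String × List String) × Option String × List String :=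
  if pvActors.contains w then
    match st.2.1 with
    | some a => (st.1 ++ [(a, st.2.2)], some w, ([] : List String))
    | none   => (st.1, some w, ([] : List String))
  else (st.1, st.2.1, st.2.2 ++ [w])

-- Stage 1: split the stream into labelled (speaker, chunk) segments
def pvSegments (words : List String) : List (String × List String) :=
  let st := words.foldl pvSegStep ([], none, [])
  match st.2.1 with
  | some a => st.1 ++ [(a, st.2.2)]
  | none   => st.1

-- Stage 2: one actor's stopwords, concatenated over that actor's segments
def pvCollect (segs : List (String × List String)) (actor : String) : List String :=
  segs.flatMap (fun p =>
    if p.1 == actor then p.2.filter (fun w => pvStopWords.contains w) else [])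

def makeStopWordListsByActor_alt (words : List String) : List String × List String × List String :=
  let segs := pvSegments words
  (pvCollect segs "Paul_Goldberger", pvCollect segs "Tony_Fadell", pvCollect segs "Rem_Koolhaas")

-- ===== PRECONDITION & SPEC =====
def Spec_makeStopWordListsByActor (words : List String) (out : List String × List String × List String) : Prop := out = makeStopWordListsByActor_alt words
instance (words : List String) (out : List String × List String × List String) : Decidable (Spec_makeStopWordListsByActor words out) := by unfold Spec_makeStopWordListsByActor; infer_instance

-- ===== CLAIM (what is proved, stated in full; the proofs are below) =====
def Claim_equal_makeStopWordListsByActor : Prop := ∀ (words : List String), Dom_makeStopWordListsByActor words → Spec_makeStopWordListsByActor words (makeStopWordListsByActor words)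

-- ===== LEMMAS AND PROOFS =====

-- the speaker is always None or one of the three actor names
def pvGood (c : Option String) : Prop :=
  c = none ∨ c = some "Paul_Goldberger" ∨ c = some "Tony_Fadell" ∨ c = some "Rem_Koolhaas"

-- A's flags corresponding to B's current speaker
def pvFlagOf (c : Option String) : Bool × Bool × Bool :=
  if c = some "Paul_Goldberger" then (true, false, false)
  else if c = some "Tony_Fadell" then (false, true, false)
  else if c = some "Rem_Koolhaas" then (false, false, true)
  else (false, false, false)

-- close the pending segment of a stage-1 state
def pvFin (st : List (String × List String) × Option String × List String) :
    List (String × List String) :=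
  match st.2.1 with
  | some a => st.1 ++ [(a, st.2.2)]
  | none   => st.1

-- A's state corresponding to a B stage-1 state
def pvAbs (st : List (String × List String) × Option String × List String) :
    (List String × List String × List String) × (Bool × Bool × Bool) :=
  ((pvCollect (pvFin st) "Paul_Goldberger", pvCollect (pvFin st) "Tony_Fadell",
    pvCollect (pvFin st) "Rem_Koolhaas"), pvFlagOf st.2.1)

theorem pvStep_sim (st : List (String × List String) × Option String × List String)
    (w : String) (h : pvGood st.2.1) :
    pvStepA (pvAbs st) w = pvAbs (pvSegStep st w) ∧ pvGood (pvSegStep st w).2.1 := by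
  obtain ⟨segs, cur, chunk⟩ := st
  by_cases h1 : w = "Paul_Goldberger"
  · subst h1
    rcases h with h | h | h | h <;> subst h <;>
      simp [pvStepA, pvSegStep, pvAbs, pvFin, pvFlagOf, pvGood, pvActors,
        pvCollect]
  · by_cases h2 : w = "Tony_Fadell"
    · subst h2
      rcases h with h | h | h | h <;> subst h <;>
        simp [pvStepA, pvSegStep, pvAbs, pvFin, pvFlagOf, pvGood, pvActors,
          pvCollect]
    · by_cases h3 : w = "Rem_Koolhaas"
      · subst h3
        rcases h with h | h | h | h <;> subst h <;>
          simp [pvStepA, pvSegStep, pvAbs, pvFin, pvFlagOf, pvGood, pvActors,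
            pvCollect]
      · by_cases hs : w ∈ pvStopWords <;>
          rcases h with h | h | h | h <;> subst h <;>
          simp [pvStepA, pvSegStep, pvAbs, pvFin, pvFlagOf, pvGood, pvActors,
            pvCollect, h1, h2, h3, hs, List.filter_append]

theorem pvFold_sim (ws : List String)
    (st : List (String × List String) × Option String × List String)
    (h : pvGood st.2.1) :
    ws.foldl pvStepA (pvAbs st) = pvAbs (ws.foldl pvSegStep st) := by
  induction ws generalizing st with
  | nil => simp
  | cons w ws ih =>
    obtain ⟨heq, hg⟩ := pvStep_sim st w h
    simp only [List.foldl_cons, heq]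
    exact ih _ hg

-- ===== VERDICT (by name: the statement is the Claim_ definition above) =====
theorem makeStopWordListsByActor_spec : Claim_equal_makeStopWordListsByActor := by
  intro words _
  unfold Spec_makeStopWordListsByActor makeStopWordListsByActor makeStopWordListsByActor_alt
  have h := pvFold_sim words ([], none, []) (Or.inl rfl)
  have h0 : pvAbs (([], none, []) :
      List (String × List String) × Option String × List String) =
      (([], [], []), (false, false, false)) := by
    simp [pvAbs, pvFin, pvCollect, pvFlagOf]
  rw [← h0, h]
  simp [pvAbs, pvSegments, pvFin]
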